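-- pv_equiv track=rewrite | github.com/gatamt/RaspberryPi-WiFi-CSI | pi/pi_ble/protocol.py | chunk_response
-- ===== SOURCE A (Python) =====
-- DEFAULT_MTU = 185  # conservative BLE MTU after 3-byte ATT header
--
-- def chunk_response(data: str, mtu: int = DEFAULT_MTU) -> list[str]:
--     """Split a large response into CHUNK:i/N:<data> notifications."""
--     if len(data.encode()) <= mtu:
--         return [data]
--
--     # Chunk by bytes, respecting UTF-8 boundaries
--     encoded = data.encode()
--     # Reserve space for "CHUNK:NN/NN:" prefix (max ~12 bytes)
--     payload_size = mtu - 15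
--     chunks: list[bytes] = []
--     pos = 0
--     while pos < len(encoded):
--         end = min(pos + payload_size, len(encoded))
--         # Don't split in the middle of a UTF-8 character
--         while end > pos and (encoded[end - 1] & 0xC0) == 0x80:
--             end -= 1
--         chunks.append(encoded[pos:end])
--         pos = end
--
--     total = len(chunks)
--     return [f"CHUNK:{i + 1}/{total}:{c.decode()}" for i, c in enumerate(chunks)]
-- ===== SOURCE B (Python) =====
-- DEFAULT_MTU = 185  # conservative BLE MTU after 3-byte ATT header
--
-- def chunk_response(data: str, mtu: int = DEFAULT_MTU) -> list[str]:
--     """Split a large response into CHUNK:i/N:<data> notifications."""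
--     if len(data.encode()) <= mtu:
--         return [data]
--     payload_size = mtu - 15
--     chunks = [data[i:i + payload_size] for i in range(0, len(data), payload_size)]
--     total = len(chunks)
--     return [f"CHUNK:{i + 1}/{total}:{c}" for i, c in enumerate(chunks)]
-- ===== Notes on version B (the rewrite author's own statement) =====
-- stated objective: simpler
-- what changed: Replaces A's byte-encode/slice loop with UTF-8 continuation-byte backtracking by a single list comprehension slicing the string directly at fixed payload_size offsets (exact on the ASCII input domain, where every character is one byte), keeping the guard and CHUNK:i/N: formatting identical.
-- outside the precondition, e.g. on chunk_response('aaaaaaaaaaaaaaaaaaaa', 10): A does not finish within the time limit, B returns []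
import Mathlib
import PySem

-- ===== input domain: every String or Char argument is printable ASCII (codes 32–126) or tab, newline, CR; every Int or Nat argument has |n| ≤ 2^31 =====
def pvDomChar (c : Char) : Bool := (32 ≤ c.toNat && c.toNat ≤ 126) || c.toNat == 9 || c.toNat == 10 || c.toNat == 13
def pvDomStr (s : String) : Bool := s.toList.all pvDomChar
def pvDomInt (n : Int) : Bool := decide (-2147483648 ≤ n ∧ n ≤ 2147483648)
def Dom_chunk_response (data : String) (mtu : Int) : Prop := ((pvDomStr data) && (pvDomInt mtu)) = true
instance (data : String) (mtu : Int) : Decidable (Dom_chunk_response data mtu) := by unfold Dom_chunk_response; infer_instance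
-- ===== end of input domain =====

-- B replaces A's byte-level loop with UTF-8 backtracking by direct fixed-width string slicing
-- (exact on the ASCII domain, where every character is one byte); objective: simpler.

-- ===== PORT A =====
-- inner `while end > pos and (encoded[end-1] & 0xC0) == 0x80: end -= 1`
def pvBackA (encoded : List Int) (pos e : Int) : Int :=
  if _h : pos < e ∧ PySem.Int.band (PySem.List.pyGetD encoded (e - 1) 0) 192 = 128 then
    pvBackA encoded pos (e - 1)
  else e
termination_by (e - pos).toNat
decreasing_by omega

-- outer `while pos < len(encoded)` loop; fuel = len(encoded) suffices whenever the Python loop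
-- terminates (payload_size ≥ 1 advances pos each step); outside Pre_ the Python never returns.
def pvLoopA (encoded : List Int) (ps : Int) : Nat → Int → List (List Int) → List (List Int)
  | 0, _, acc => acc
  | fuel + 1, pos, acc =>
    if pos < (encoded.length : Int) then
      let e := pvBackA encoded pos (min (pos + ps) (encoded.length : Int))
      pvLoopA encoded ps fuel e (acc ++ [PySem.List.slice encoded (some pos) (some e)])
    else acc

def chunk_response (data : String) (mtu : Int) : List String :=
  -- data.encode(): exact on the ASCII domain (one byte per character, byte value = code point)
  let encoded : List Int := data.toList.map (fun c => (c.toNat : Int))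
  if (encoded.length : Int) ≤ mtu then [data]
  else
    let payload_size := mtu - 15
    let chunks := pvLoopA encoded payload_size encoded.length 0 []
    let total : Int := chunks.length
    (PySem.List.enumerate chunks).map (fun ic =>
      "CHUNK:" ++ PySem.Int.toStr (ic.1 + 1) ++ "/" ++ PySem.Int.toStr total ++ ":"
        ++ String.ofList (ic.2.map (fun b => Char.ofNat b.toNat)))

-- ===== PORT B =====
def chunk_response_alt (data : String) (mtu : Int) : List String :=
  let chars := data.toList
  -- len(data.encode()): exact on the ASCII domain (one byte per character)
  if (chars.length : Int) ≤ mtu then [data]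
  else
    let payload_size := mtu - 15
    let chunks := (PySem.List.pyRange 0 chars.length payload_size).map
      (fun i => String.ofList (PySem.List.slice chars (some i) (some (i + payload_size))))
    let total : Int := chunks.length
    (PySem.List.enumerate chunks).map (fun ic =>
      "CHUNK:" ++ PySem.Int.toStr (ic.1 + 1) ++ "/" ++ PySem.Int.toStr total ++ ":" ++ ic.2)

-- ===== PRECONDITION & SPEC =====
-- Pre_ excludes only the inputs on which the Python A never returns: when the data is longer than
-- mtu and payload_size = mtu - 15 ≤ 0, A's outer while loop runs forever (pos never advances).
def Pre_chunk_response (data : String) (mtu : Int) : Prop :=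
  (data.toList.length : Int) ≤ mtu ∨ 16 ≤ mtu
instance (data : String) (mtu : Int) : Decidable (Pre_chunk_response data mtu) := by
  unfold Pre_chunk_response; infer_instance

def pvWitness_chunk_response : String × Int := ("hello BLE world, a long reply", 16)

def Spec_chunk_response (data : String) (mtu : Int) (out : List String) : Prop := out = chunk_response_alt data mtu
instance (data : String) (mtu : Int) (out : List String) : Decidable (Spec_chunk_response data mtu out) := by unfold Spec_chunk_response; infer_instance

-- ===== CLAIM (what is proved, stated in full; the proofs are below) =====
def Claim_equal_chunk_response : Prop := ∀ (data : String) (mtu : Int), Dom_chunk_response data mtu → Pre_chunk_response data mtu → Spec_chunk_response data mtu (chunk_response data mtu)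

-- ===== LEMMAS AND PROOFS =====

-- range(a, b, s) with positive step, a < b: peel off the first element
lemma pvRange_pos_cons (a b s : Int) (hs : 0 < s) (hab : a < b) :
    PySem.List.pyRange a b s = a :: PySem.List.pyRange (a + s) b s := by
  rw [PySem.List.pyRange_of_pos _ _ hs, PySem.List.pyRange_of_pos _ _ hs, if_pos hab]
  by_cases h2 : a + s < b
  · rw [if_pos h2]
    have hdiv : (b - a + s - 1) / s = (b - (a + s) + s - 1) / s + 1 := by
      have key : b - a + s - 1 = (b - (a + s) + s - 1) + 1 * s := by ring
      rw [key, Int.add_mul_ediv_right _ _ (by omega)]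
    have hnn : 0 ≤ (b - (a + s) + s - 1) / s := Int.ediv_nonneg (by omega) (by omega)
    have ht : ((b - a + s - 1) / s).toNat = ((b - (a + s) + s - 1) / s).toNat + 1 := by omega
    rw [ht, List.range_succ_eq_map, List.map_cons, List.map_map]
    refine List.cons_eq_cons.mpr ⟨by simp, ?_⟩
    apply List.map_congr_left; intro k _; simp [Nat.succ_eq_add_one]; ring
  · rw [if_neg h2]
    have h1 : 1 ≤ (b - a + s - 1) / s := by rw [Int.le_ediv_iff_mul_le hs]; omega
    have h2' : (b - a + s - 1) / s < 2 := by rw [Int.ediv_lt_iff_lt_mul hs]; omega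
    have ht : ((b - a + s - 1) / s).toNat = 1 := by omega
    rw [ht]; simp

lemma pvRange_pos_nil (a b s : Int) (hs : 0 < s) (hab : b ≤ a) :
    PySem.List.pyRange a b s = [] := by
  rw [PySem.List.pyRange_of_pos _ _ hs, if_neg (by omega)]; simp

lemma pvGetD_mem_or_default (xs : List Int) (i d : Int) :
    PySem.List.pyGetD xs i d = d ∨ PySem.List.pyGetD xs i d ∈ xs := by
  unfold PySem.List.pyGetD PySem.List.pyGet?
  rcases h3 : PySem.List.pyIdx? xs.length i with _ | j
  · simp
  · simp only [Option.bind_some]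
    rcases h : xs[j]? with _ | v
    · simp
    · simp only [Option.getD_some]
      right
      exact List.mem_of_getElem? h

-- on all-ASCII bytes (0 ≤ b < 128) the continuation-byte test (b & 0xC0) == 0x80 is always false,
-- so A's inner backtracking loop is the identity
lemma pvBackA_id (encoded : List Int) (hb : ∀ x ∈ encoded, 0 ≤ x ∧ x < 128) (pos e : Int) :
    pvBackA encoded pos e = e := by
  unfold pvBackA
  rw [dif_neg]
  rintro ⟨_, hband⟩
  rcases pvGetD_mem_or_default encoded (e - 1) 0 with h | h
  · rw [h] at hband; simp [PySem.Int.band] at hband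
  · obtain ⟨h0, h128⟩ := hb _ h
    set v := PySem.List.pyGetD encoded (e - 1) 0 with hv
    have : v = ((v.toNat : Nat) : Int) := by omega
    rw [this, show ((192 : Int)) = ((192 : Nat) : Int) from rfl, PySem.Int.band_natCast] at hband
    have hle : v.toNat &&& 192 ≤ v.toNat := Nat.and_le_left
    omega

-- A's outer loop, under ASCII bytes and payload_size ≥ 1, walks the positions 0, ps, 2·ps, …
lemma pvLoopA_eq (encoded : List Int) (ps : Int) (hps : 1 ≤ ps)
    (hb : ∀ x ∈ encoded, 0 ≤ x ∧ x < 128) :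
    ∀ (fuel : Nat) (pos : Int) (acc : List (List Int)), 0 ≤ pos →
      (encoded.length : Int) - pos ≤ fuel →
      pvLoopA encoded ps fuel pos acc =
        acc ++ (PySem.List.pyRange pos encoded.length ps).map
          (fun i => PySem.List.slice encoded (some i) (some (i + ps))) := by
  intro fuel
  induction fuel with
  | zero =>
    intro pos acc h0 hf
    rw [pvLoopA, pvRange_pos_nil _ _ _ (by omega) (by omega)]
    simp
  | succ fuel ih =>
    intro pos acc h0 hf
    rw [pvLoopA]
    by_cases hlt : pos < (encoded.length : Int)
    · rw [if_pos hlt]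
      rw [pvBackA_id encoded hb]
      set n : Int := (encoded.length : Int) with hn
      set e := min (pos + ps) n with he
      have h1 : pos + 1 ≤ e := by omega
      have h2 : e ≤ n := by omega
      rw [ih e _ (by omega) (by omega)]
      rw [pvRange_pos_cons pos n ps (by omega) hlt, List.map_cons]
      have hslice : PySem.List.slice encoded (some pos) (some e)
          = PySem.List.slice encoded (some pos) (some (pos + ps)) := by
        rw [PySem.List.slice_toNat _ (by omega) (by omega),
            PySem.List.slice_toNat _ (by omega) (by omega)]
        by_cases hc : pos + ps ≤ n
        · have : e = pos + ps := by omega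
          rw [this]
        · have hen : e = n := by omega
          rw [hen]
          have hlen : (List.drop pos.toNat encoded).length = n.toNat - pos.toNat := by
            rw [List.length_drop]; omega
          rw [List.take_of_length_le (by omega), List.take_of_length_le (by omega)]
      have hrange : PySem.List.pyRange e n ps = PySem.List.pyRange (pos + ps) n ps := by
        by_cases hc : pos + ps ≤ n
        · have : e = pos + ps := by omega
          rw [this]
        · rw [pvRange_pos_nil _ _ _ (by omega) (by omega),
              pvRange_pos_nil _ _ _ (by omega) (by omega)]
      rw [hslice, hrange]
      simp
    · rw [if_neg hlt, pvRange_pos_nil _ _ _ (by omega) (by omega)]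
      simp

-- enumerate commutes with map on the elements
lemma pvEnumerate_map {α β : Type} (l : List α) (g : α → β) (k : Int) :
    PySem.List.enumerate (l.map g) k = (PySem.List.enumerate l k).map (fun p => (p.1, g p.2)) := by
  induction l generalizing k <;> simp_all [PySem.List.enumerate]

-- the byte chunks A cuts, decoded, are exactly B's string chunks
lemma pvChunks_eq (chars : List Char) (ps : Int) (hps : 1 ≤ ps)
    (hd : ∀ c ∈ chars, pvDomChar c = true) :
    (pvLoopA (chars.map (fun c => (c.toNat : Int))) ps (chars.map (fun c => (c.toNat : Int))).length 0 []).map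
        (fun bs => String.ofList (bs.map (fun b => Char.ofNat b.toNat)))
      = (PySem.List.pyRange 0 chars.length ps).map
          (fun i => String.ofList (PySem.List.slice chars (some i) (some (i + ps)))) := by
  set encoded := chars.map (fun c => (c.toNat : Int)) with hedef
  have hb : ∀ x ∈ encoded, 0 ≤ x ∧ x < 128 := by
    intro x hx
    rw [hedef] at hx
    obtain ⟨c, hc, rfl⟩ := List.mem_map.mp hx
    have := hd c hc
    simp [pvDomChar] at this
    omega
  rw [pvLoopA_eq encoded ps hps hb encoded.length 0 [] le_rfl (by omega)]
  rw [List.nil_append, List.map_map]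
  have hlen : encoded.length = chars.length := by rw [hedef]; exact List.length_map ..
  rw [hlen]
  apply List.map_congr_left
  intro i hi
  have h0i : 0 ≤ i := by
    have := (PySem.List.mem_pyRange_iff_of_pos (by omega) i).mp hi
    omega
  simp only [Function.comp]
  rw [PySem.List.slice_toNat _ h0i (by omega), PySem.List.slice_toNat _ h0i (by omega),
      hedef, ← List.map_drop, ← List.map_take, List.map_map]
  congr 1
  have : ((fun b => Char.ofNat b.toNat) ∘ fun c => ((c.toNat : Int))) = id := by
    funext c; simp [Char.ofNat_toNat]
  rw [this, List.map_id]

-- ===== VERDICT (by name: the statement is the Claim_ definition above) =====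
theorem chunk_response_spec : Claim_equal_chunk_response := by
  intro data mtu hdom hpre
  unfold Spec_chunk_response chunk_response chunk_response_alt
  simp only []
  have hlen : (data.toList.map (fun c => (c.toNat : Int))).length = data.toList.length :=
    List.length_map ..
  by_cases hg : (data.toList.length : Int) ≤ mtu
  · rw [if_pos (by rw [hlen]; exact hg), if_pos hg]
  · rw [if_neg (by rw [hlen]; exact hg), if_neg hg]
    have hps : 1 ≤ mtu - 15 := by
      rcases hpre with h | h
      · exact absurd h hg
      · omega
    have hd : ∀ c ∈ data.toList, pvDomChar c = true := by
      unfold Dom_chunk_response pvDomStr at hdom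
      simp at hdom
      exact fun c hc => hdom.1 c hc
    have hchunks := pvChunks_eq data.toList (mtu - 15) hps hd
    rw [← hchunks, pvEnumerate_map, List.map_map]
    apply List.map_congr_left
    intro ic _
    simp only [Function.comp_def, List.length_map]
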